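-- pv_equiv track=rewrite | github.com/Yukon51/CTF_Script | 16进制文本转换ascii.py | xor_str
-- ===== SOURCE A (Python) =====
-- def xor_str(cipher_text: str):
--     ret = []
--     for i in range(1, 256):
--         add_text, flag = "", 0
--         for number in cipher_text.encode():
--             num = number ^ i
--             if 31 < num < 127:
--                 add_text += chr(num)
--             else:
--                 add_text += "~"
--                 flag = 1
--         ret.append([f"^{i}", add_text, flag])
--     return ret
-- ===== SOURCE B (Python) =====
-- def xor_str(cipher_text: str):
--     data = cipher_text.encode()
--     present = set(data)
--     ret = []
--     for i in range(1, 256):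
--         table = bytes((v ^ i) if 31 < (v ^ i) < 127 else 126 for v in range(256))
--         add_text = data.translate(table).decode('ascii')
--         flag = 1 if any(not (31 < (v ^ i) < 127) for v in present) else 0
--         ret.append([f"^{i}", add_text, flag])
--     return ret
-- ===== Notes on version B (the rewrite author's own statement) =====
-- stated objective: faster
-- what changed: B replaces the per-key character loop by one 256-entry translation table applied with bytes.translate per key, and computes the flag independently from the set of distinct byte values present instead of setting it while building the text.
import Mathlib
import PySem

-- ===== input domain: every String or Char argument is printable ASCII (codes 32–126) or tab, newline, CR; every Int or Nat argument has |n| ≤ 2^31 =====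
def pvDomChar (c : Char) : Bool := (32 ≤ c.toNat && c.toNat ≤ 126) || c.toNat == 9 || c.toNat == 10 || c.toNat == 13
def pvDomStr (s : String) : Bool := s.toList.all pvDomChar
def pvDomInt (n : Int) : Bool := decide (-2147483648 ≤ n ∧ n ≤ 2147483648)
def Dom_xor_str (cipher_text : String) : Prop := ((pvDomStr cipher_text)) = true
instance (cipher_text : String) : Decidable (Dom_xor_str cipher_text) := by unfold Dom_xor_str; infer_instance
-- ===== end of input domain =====

-- B builds each key's output with a 256-entry translation table and derives the flag from the
-- set of distinct byte values, instead of A's per-character append loop; same return value.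

-- ===== PORT A =====
-- cipher_text.encode(): UTF-8 bytes; exact on Dom (all code points < 128, one byte per char)
def xor_str (cipher_text : String) : List (String × String × Int) :=
  let bytes : List Nat := cipher_text.toList.map Char.toNat
  (PySem.List.pyRange 1 256 1).foldl (fun ret i =>
    let r := bytes.foldl (fun (st : List Char × Int) number =>
      let num := number ^^^ i.toNat
      if 31 < num ∧ num < 127 then (st.1 ++ [Char.ofNat num], st.2)
      else (st.1 ++ ['~'], 1)) ([], 0)
    ret ++ [("^" ++ PySem.Int.toStr i, String.ofList r.1, r.2)]) []

-- ===== PORT B =====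
-- data = cipher_text.encode(): exact on Dom (ASCII); table = bytes(...); data.translate(table)
def xor_str_alt (cipher_text : String) : List (String × String × Int) :=
  let data : List Nat := cipher_text.toList.map Char.toNat
  let present : PySem.Set Nat := PySem.Set.ofList data
  (PySem.List.pyRange 1 256 1).foldl (fun ret i =>
    let table : List Nat := (List.range 256).map (fun v =>
      if 31 < v ^^^ i.toNat ∧ v ^^^ i.toNat < 127 then v ^^^ i.toNat else 126)
    let add_text := String.ofList (data.map (fun b => Char.ofNat (table.getD b 0)))
    let flag : Int :=
      if present.any (fun v => !(decide (31 < v ^^^ i.toNat) && decide (v ^^^ i.toNat < 127))) then 1 else 0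
    ret ++ [("^" ++ PySem.Int.toStr i, add_text, flag)]) []

-- ===== PRECONDITION & SPEC =====
def Spec_xor_str (cipher_text : String) (out : List (String × String × Int)) : Prop := out = xor_str_alt cipher_text
instance (cipher_text : String) (out : List (String × String × Int)) : Decidable (Spec_xor_str cipher_text out) := by unfold Spec_xor_str; infer_instance

-- ===== CLAIM (what is proved, stated in full; the proofs are below) =====
def Claim_equal_xor_str : Prop := ∀ (cipher_text : String), Dom_xor_str cipher_text → Spec_xor_str cipher_text (xor_str cipher_text)

-- ===== LEMMAS AND PROOFS =====

theorem pv_foldl_append {α β : Type} (f : α → β) (l : List α) (acc : List β) :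
    l.foldl (fun r i => r ++ [f i]) acc = acc ++ l.map f := by
  induction l generalizing acc with
  | nil => simp
  | cons a l ih => simp [List.foldl, ih]

theorem pv_inner (i : Nat) (bs : List Nat) (acc : List Char) (f0 : Int) :
    bs.foldl (fun (st : List Char × Int) number =>
        let num := number ^^^ i
        if 31 < num ∧ num < 127 then (st.1 ++ [Char.ofNat num], st.2)
        else (st.1 ++ ['~'], 1)) (acc, f0)
    = (acc ++ bs.map (fun b => if 31 < b ^^^ i ∧ b ^^^ i < 127 then Char.ofNat (b ^^^ i) else '~'),
       if bs.any (fun b => !(decide (31 < b ^^^ i) && decide (b ^^^ i < 127))) then 1 else f0) := by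
  induction bs generalizing acc f0 with
  | nil => simp
  | cons b bs ih =>
    simp only [List.foldl_cons, List.map_cons, List.any_cons]
    by_cases h : 31 < b ^^^ i ∧ b ^^^ i < 127
    · rw [if_pos h, ih]
      simp [h.1, h.2]
    · rw [if_neg h, ih]
      have hb : (!(decide (31 < b ^^^ i) && decide (b ^^^ i < 127))) = true := by
        simp only [Bool.not_eq_eq_eq_not, Bool.not_true, Bool.and_eq_false_imp]
        by_cases h1 : 31 < b ^^^ i
        · simp [h1]; omega
        · simp [h1]
      simp [hb, h]

theorem pv_table (i : Nat) (b : Nat) (hb : b < 256) :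
    Char.ofNat (((List.range 256).map (fun v =>
        if 31 < v ^^^ i ∧ v ^^^ i < 127 then v ^^^ i else 126)).getD b 0)
    = (if 31 < b ^^^ i ∧ b ^^^ i < 127 then Char.ofNat (b ^^^ i) else '~') := by
  rw [List.getD_eq_getElem?_getD]
  simp only [List.getElem?_map, List.getElem?_range hb, Option.map_some, Option.getD_some]
  split_ifs with h
  · rfl
  · decide

theorem pv_set_any {p : Nat → Bool} (bs : List Nat) :
    (PySem.Set.ofList bs).any p = bs.any p := by
  rcases h : bs.any p with _ | _
  · simp only [List.any_eq_false] at h ⊢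
    intro x hx
    exact h x ((PySem.Set.mem_ofList _ _).1 hx)
  · simp only [List.any_eq_true] at h ⊢
    obtain ⟨x, hx, hp⟩ := h
    exact ⟨x, (PySem.Set.mem_ofList _ _).2 hx, hp⟩

theorem xor_str_spec : Claim_equal_xor_str := by
  intro s hdom
  unfold Spec_xor_str xor_str xor_str_alt
  simp only
  rw [pv_foldl_append, pv_foldl_append]
  simp only [List.nil_append]
  apply List.map_congr_left
  intro i _
  rw [pv_inner]
  simp only [List.nil_append]
  refine Prod.ext rfl (Prod.ext ?_ ?_)
  · show String.ofList _ = String.ofList _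
    congr 1
    apply List.map_congr_left
    intro b hb
    obtain ⟨c, hc, rfl⟩ := List.mem_map.1 hb
    have hcd : pvDomChar c = true := List.all_eq_true.1 hdom c hc
    have : c.toNat < 256 := by
      simp only [pvDomChar, Bool.or_eq_true, Bool.and_eq_true, decide_eq_true_eq, beq_iff_eq] at hcd
      omega
    exact (pv_table i.toNat c.toNat this).symm
  · show _ = (if _ then (1:Int) else 0)
    rw [pv_set_any]
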